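-- pv_equiv track=rewrite | github.com/ho323/Algorithm_Practice | programmers/p12947[2021.12.23].py | solution
-- ===== SOURCE A (Python) =====
-- def solution(x):
--     answer = False
--     h = 0
--     for i in range(len(str(x))):
--         h += int(str(x)[i])
--     if x % h == 0:
--         answer = True
--     return answer
-- ===== SOURCE B (Python) =====
-- def solution(x):
--     h = 0
--     n = x
--     while n > 0:
--         h += n % 10
--         n //= 10
--     return x % h == 0
-- ===== Notes on version B (the rewrite author's own statement) =====
-- stated objective: idiomatic
-- what changed: B computes the digit sum arithmetically with a while-loop of % 10 and // 10 over the number instead of converting to a string and indexing/parsing each character.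
import Mathlib
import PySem

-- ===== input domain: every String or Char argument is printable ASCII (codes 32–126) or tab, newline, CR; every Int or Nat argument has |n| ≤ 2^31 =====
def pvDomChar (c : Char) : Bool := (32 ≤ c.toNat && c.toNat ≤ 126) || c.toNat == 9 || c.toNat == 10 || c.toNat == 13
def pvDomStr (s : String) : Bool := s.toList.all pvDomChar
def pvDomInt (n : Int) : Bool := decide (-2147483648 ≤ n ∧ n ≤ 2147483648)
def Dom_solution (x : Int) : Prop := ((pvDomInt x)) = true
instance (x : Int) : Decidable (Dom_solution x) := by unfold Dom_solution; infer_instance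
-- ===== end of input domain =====

-- ===== PORT A =====
-- B replaces A's per-character string parsing by an arithmetic %10 // 10 digit-sum loop; idiomatic, same result on x > 0 (A raises on x <= 0, excluded by Pre_).
-- int(str(x)[i]): the range index is always in bounds, so pyGetD's default is never read.
def solution (x : Int) : Bool :=
  let answer := false
  let h : Int :=
    (PySem.List.pyRange 0 (PySem.Str.len (PySem.Int.toStr x)) 1).foldl
      (fun h i =>
        h + ((PySem.Int.ofChars? [PySem.List.pyGetD (PySem.Int.toStr x).toList i ' ']).getD 0)) 0
  if PySem.Int.mod x h = 0 then true else answer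

-- ===== PORT B =====
-- while n > 0: h += n % 10; n //= 10
def altDigitSum (n : Int) : Int :=
  if h : 0 < n then
    PySem.Int.mod n 10 + altDigitSum (PySem.Int.floordiv n 10)
  else 0
termination_by n.toNat
decreasing_by
  have hd : PySem.Int.floordiv n 10 = n / 10 := PySem.Int.floordiv_eq_ediv_of_pos (by omega)
  simp only [hd]
  omega

def solution_alt (x : Int) : Bool :=
  let hsum := altDigitSum x
  decide (PySem.Int.mod x hsum = 0)

-- ===== PRECONDITION & SPEC =====
-- Pre_ excludes exactly the inputs where A raises: x < 0 (ValueError from int('-')) and x = 0 (ZeroDivisionError).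
def Pre_solution (x : Int) : Prop := 0 < x
instance (x : Int) : Decidable (Pre_solution x) := by unfold Pre_solution; infer_instance
def pvWitness_solution : Int := (10)

def Spec_solution (x : Int) (out : Bool) : Prop := out = solution_alt x
instance (x : Int) (out : Bool) : Decidable (Spec_solution x out) := by unfold Spec_solution; infer_instance

-- ===== CLAIM (what is proved, stated in full; the proofs are below) =====
def Claim_equal_solution : Prop := ∀ (x : Int), Dom_solution x → Pre_solution x → Spec_solution x (solution x)

-- ===== LEMMAS AND PROOFS =====

def pvVal (c : Char) : Int := (PySem.Int.ofChars? [c]).getD 0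

theorem pvVal_digitChar (d : Nat) (hd : d < 10) : pvVal (Nat.digitChar d) = d := by
  interval_cases d <;> decide

def pvDsum (n : Nat) : Int :=
  if n = 0 then 0 else (n % 10 : Nat) + pvDsum (n / 10)

theorem pv_toDigitsCore_sum (fuel : Nat) :
    ∀ (n : Nat) (ds : List Char), n < fuel →
      ((Nat.toDigitsCore 10 fuel n ds).map pvVal).sum
        = pvDsum n + ((ds.map pvVal).sum) := by
  induction fuel with
  | zero => intro n ds h; omega
  | succ f ih =>
    intro n ds h
    rw [Nat.toDigitsCore]
    by_cases h0 : n / 10 = 0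
    · rw [if_pos h0]
      have hp : pvDsum n = ((n % 10 : Nat) : Int) := by
        rw [pvDsum]
        by_cases hn : n = 0
        · subst hn; simp
        · rw [if_neg hn, h0, pvDsum, if_pos rfl]; ring
      simp only [List.map_cons, List.sum_cons]
      rw [pvVal_digitChar (n % 10) (by omega), hp]
    · rw [if_neg h0, ih (n / 10) _ (by omega)]
      have hp : pvDsum n = ((n % 10 : Nat) : Int) + pvDsum (n / 10) := by
        rw [pvDsum, if_neg (by omega)]
      simp only [List.map_cons, List.sum_cons]
      rw [pvVal_digitChar (n % 10) (by omega), hp]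
      ring

theorem pv_toDigits_sum (n : Nat) :
    ((Nat.toDigits 10 n).map pvVal).sum = pvDsum n := by
  have := pv_toDigitsCore_sum (n + 1) n [] (by omega)
  simpa [Nat.toDigits] using this

theorem pv_altDigitSum_eq (x : Int) (hx : 0 < x) :
    altDigitSum x = pvDsum x.toNat := by
  have hlt : (PySem.Int.floordiv x 10).toNat < x.toNat := by
    have hd : PySem.Int.floordiv x 10 = x / 10 := PySem.Int.floordiv_eq_ediv_of_pos (by omega)
    rw [hd]; omega
  rw [altDigitSum, dif_pos hx, pvDsum, if_neg (by omega)]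
  have hd : PySem.Int.floordiv x 10 = x / 10 := PySem.Int.floordiv_eq_ediv_of_pos (by omega)
  have hm : PySem.Int.mod x 10 = x % 10 := PySem.Int.mod_eq_emod_of_pos (by omega)
  by_cases hq : 0 < x / 10
  · rw [pv_altDigitSum_eq (PySem.Int.floordiv x 10) (hd ▸ hq)]
    rw [hd, hm]
    have h1 : ((x.toNat % 10 : Nat) : Int) = x % 10 := by omega
    have h2 : (x / 10).toNat = x.toNat / 10 := by omega
    rw [h1, h2]
  · have hq0 : x / 10 = 0 := by omega
    have hn0 : x.toNat / 10 = 0 := by omega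
    rw [hd, hq0, hn0, altDigitSum, dif_neg (by omega), pvDsum, if_pos rfl, hm]
    omega
termination_by x.toNat

theorem pv_foldl_add_val (l : List Char) (a : Int) :
    l.foldl (fun h c => h + pvVal c) a = a + (l.map pvVal).sum := by
  induction l generalizing a with
  | nil => simp
  | cons c t ih => simp [ih, add_assoc]

theorem pv_string_sum (x : Int) (hx : 0 < x) :
    (PySem.List.pyRange 0 (PySem.Str.len (PySem.Int.toStr x)) 1).foldl
      (fun h i =>
        h + ((PySem.Int.ofChars? [PySem.List.pyGetD (PySem.Int.toStr x).toList i ' ']).getD 0)) 0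
      = altDigitSum x := by
  show List.foldl
      (fun h i => h + pvVal (PySem.List.pyGetD (PySem.Int.toStr x).toList i ' ')) 0
      (PySem.List.pyRange 0 (PySem.Str.len (PySem.Int.toStr x)) 1) = altDigitSum x
  have hlen : PySem.Str.len (PySem.Int.toStr x)
      = PySem.List.len (PySem.Int.toStr x).toList := by
    simp [PySem.Str.len, PySem.List.len]
  rw [hlen]
  rw [PySem.List.foldl_pyRange_pyGetD (f := fun h c => h + pvVal c)
      (xs := (PySem.Int.toStr x).toList) (d := ' ') (init := 0) (a := 0) (by omega)]
  rw [pv_foldl_add_val]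
  rw [PySem.Int.toList_toStr]
  have : PySem.Int.toChars x = Nat.toDigits 10 x.toNat := by
    simp [PySem.Int.toChars, not_lt.mpr (le_of_lt hx)]
  rw [this]
  simp only [Int.toNat_zero, List.drop_zero, zero_add]
  rw [pv_toDigits_sum, pv_altDigitSum_eq x hx]

-- ===== VERDICT (by name: the statement is the Claim_ definition above) =====
theorem solution_spec : Claim_equal_solution := by
  intro x _ hx
  unfold Spec_solution solution solution_alt
  rw [pv_string_sum x hx]
  by_cases h : PySem.Int.mod x (altDigitSum x) = 0 <;> simp [h]
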